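-- pv_equiv track=rewrite | github.com/wazuh/wazuh-dashboard-plugins | docker/splunk-dashboard/splunk-etc/apps/search/bin/return.py | findNotInQuotes
-- ===== SOURCE A (Python) =====
-- def findNotInQuotes(text, find, i=0):
--     index = -1
--     inQuote = False
--     l = len(text)
--     while i < l:
--         ch = text[i]
--         if ch == '\\':
--             i += 1
--         elif ch == '"':
--             inQuote = not inQuote
--         elif text[i:].startswith(find) and not inQuote:
--             index = i
--             break
--         i += 1
--     return index
-- ===== SOURCE B (Python) =====
-- def findNotInQuotes(text, find, i=0):
--     # Jump between literal occurrences of `find` with str.find instead of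
--     # scanning every character; a lazy cursor c / inQuote flag classifies
--     # positions (backslash skips the next char, '"' toggles quoting) only
--     # as far as each candidate occurrence.
--     l = len(text)
--     start = i
--     c = i
--     inQuote = False
--     while True:
--         pos = text.find(find, start)
--         if pos == -1 or pos >= l:
--             return -1
--         # advance the classification cursor up to pos
--         while c < pos:
--             if text[c] == '\\':
--                 c += 2
--             else:
--                 if text[c] == '"':
--                     inQuote = not inQuote
--                 c += 1
--         if c == pos and not inQuote and text[pos] != '\\' and text[pos] != '"':
--             return pos
--         # consume position pos itself so the cursor moves past it
--         while c < pos + 1: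
--             if text[c] == '\\':
--                 c += 2
--             else:
--                 if text[c] == '"':
--                     inQuote = not inQuote
--                 c += 1
--         start = pos + 1
-- ===== Notes on version B (the rewrite author's own statement) =====
-- stated objective: faster
-- what changed: Instead of A's character-by-character scan that re-checks startswith at every plain character, B jumps between literal occurrences of `find` via str.find(find, start) and keeps a lazily advanced cursor (position + inQuote flag applying the backslash-skip and quote-toggle rules) to decide whether each candidate occurrence is an eligible, unescaped, outside-quotes match start.
-- outside the precondition, e.g. on findNotInQuotes('ab', 'a', -2): A returns -2, B returns 0
import Mathlib
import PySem

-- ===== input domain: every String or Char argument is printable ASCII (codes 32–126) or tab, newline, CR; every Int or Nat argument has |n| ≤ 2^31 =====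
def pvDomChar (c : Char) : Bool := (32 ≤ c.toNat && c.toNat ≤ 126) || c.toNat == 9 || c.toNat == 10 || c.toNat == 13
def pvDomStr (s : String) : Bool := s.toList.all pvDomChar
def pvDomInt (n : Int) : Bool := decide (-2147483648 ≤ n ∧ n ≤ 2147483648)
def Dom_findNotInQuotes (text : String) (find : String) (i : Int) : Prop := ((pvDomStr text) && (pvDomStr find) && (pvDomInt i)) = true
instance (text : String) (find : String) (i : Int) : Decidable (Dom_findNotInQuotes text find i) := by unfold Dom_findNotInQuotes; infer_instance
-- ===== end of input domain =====

-- B replaces A's character-by-character scan with a loop that jumps between literal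
-- occurrences of `find` (str.find) and classifies each candidate with a lazily advanced
-- cursor (objective: alternative decomposition). Equivalence is claimed for 0 ≤ i (Pre_).


-- ===== PORT A =====
-- A's while loop, step for step: on '\\' Python does i += 1 and the trailing i += 1
-- gives +2; on '"' inQuote toggles; otherwise text[i:].startswith(find) outside quotes
-- breaks with index = i (so the loop returns i), else -1 after the loop.
-- The Nat fuel only makes the recursion structural: ((len - i)).toNat steps always suffice
-- since i strictly increases (proved below via the fuel-free twin loopAW).
def findNotInQuotesLoop (t f : List Char) : Nat → Int → Bool → Int
  | 0, _, _ => -1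
  | n + 1, i, q =>
    if i < (t.length : Int) then
      match PySem.List.pyGet? t i with
      | none => -1
      | some ch =>
        if ch = '\\' then findNotInQuotesLoop t f n (i + 2) q
        else if ch = '"' then findNotInQuotesLoop t f n (i + 1) (!q)
        else if PySem.Chars.startswith (PySem.List.slice t (some i) none) f && !q then i
        else findNotInQuotesLoop t f n (i + 1) q
    else -1

def findNotInQuotes (text : String) (find : String) (i : Int) : Int :=
  findNotInQuotesLoop text.toList find.toList ((text.toList.length : Int) - i).toNat i false

-- ===== PORT B =====
-- hand port of Source B's text.find(find, start): first j ≥ start with find a prefix of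
-- text[j:]; exact for start ≥ 0, the only use under Pre_. Fuel as above.
def findFromB (t f : List Char) : Nat → Int → Int
  | 0, _ => -1
  | n + 1, j =>
    if j ≤ (t.length : Int) then
      if List.isPrefixOf f (PySem.List.slice t (some j) none) then j
      else findFromB t f n (j + 1)
    else -1


-- Source B's inner `while c < stop` cursor loop (stop is pos, or pos+1 when consuming pos)
def advCursor (t : List Char) : Nat → Int → Int → Bool → Int × Bool
  | 0, _, c, q => (c, q)
  | n + 1, stop, c, q =>
    if c < stop then
      match PySem.List.pyGet? t c with
      | none => advCursor t n stop (c + 1) q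
      | some ch =>
        if ch = '\\' then advCursor t n stop (c + 2) q
        else if ch = '"' then advCursor t n stop (c + 1) (!q)
        else advCursor t n stop (c + 1) q
    else (c, q)


-- Source B's outer loop; each helper call carries its (always sufficient) fuel
-- Python's str.find clamps a negative start like a slice bound (start += len, floor 0);
-- part of porting Source B's text.find(find, start) exactly.
def pyFind (t f : List Char) (start : Int) : Int :=
  let s := if start < 0 then max (start + t.length) 0 else start
  findFromB t f ((t.length : Int) + 1 - s).toNat s

def findNotInQuotesAltLoop (t f : List Char) : Nat → Int → Int → Bool → Int
  | 0, _, _, _ => -1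
  | n + 1, start, c, q =>
    let pos := pyFind t f start
    if pos = -1 then -1
    else if (t.length : Int) ≤ pos then -1
    else
      let s1 := advCursor t (pos - c).toNat pos c q
      match PySem.List.pyGet? t pos with
      | none => -1
      | some ch =>
        if s1.1 = pos ∧ s1.2 = false ∧ ch ≠ '\\' ∧ ch ≠ '"' then pos
        else
          let s2 := advCursor t (pos + 1 - s1.1).toNat (pos + 1) s1.1 s1.2
          findNotInQuotesAltLoop t f n (pos + 1) s2.1 s2.2

def findNotInQuotes_alt (text : String) (find : String) (i : Int) : Int :=
  findNotInQuotesAltLoop text.toList find.toList ((text.toList.length : Int) + 1 - i).toNat i i false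

-- ===== PRECONDITION & SPEC =====
-- Pre_ restricts to the natural domain of non-negative start indices: for negative i,
-- A scans with Python negative-index wraparound (reading characters from the end of the
-- string, an accident of Python indexing) and raises IndexError whenever i < -len(text).
def Pre_findNotInQuotes (text : String) (find : String) (i : Int) : Prop := 0 ≤ i
instance (text : String) (find : String) (i : Int) : Decidable (Pre_findNotInQuotes text find i) := by unfold Pre_findNotInQuotes; infer_instance

def pvWitness_findNotInQuotes : String × String × Int := ("a\"b\\\"c\"d", "b", 0)

def Spec_findNotInQuotes (text : String) (find : String) (i : Int) (out : Int) : Prop := out = findNotInQuotes_alt text find i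
instance (text : String) (find : String) (i : Int) (out : Int) : Decidable (Spec_findNotInQuotes text find i out) := by unfold Spec_findNotInQuotes; infer_instance

-- ===== CLAIM (what is proved, stated in full; the proofs are below) =====
def Claim_equal_findNotInQuotes : Prop := ∀ (text : String) (find : String) (i : Int), Dom_findNotInQuotes text find i → Pre_findNotInQuotes text find i → Spec_findNotInQuotes text find i (findNotInQuotes text find i)

-- ===== LEMMAS AND PROOFS =====
-- Fuel-free well-founded twins of the two loops, the loop invariants, and the
-- equivalence proof loopAW = altW for 0 ≤ start ≤ c.

-- ===== WF twins =====
def loopAW (t f : List Char) (i : Int) (q : Bool) : Int :=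
  if h : i < (t.length : Int) then
    match PySem.List.pyGet? t i with
    | none => -1
    | some ch =>
      if ch = '\\' then loopAW t f (i + 2) q
      else if ch = '"' then loopAW t f (i + 1) (!q)
      else if PySem.Chars.startswith (PySem.List.slice t (some i) none) f && !q then i
      else loopAW t f (i + 1) q
  else -1
termination_by ((t.length : Int) - i).toNat
decreasing_by all_goals omega

def findFromW (t f : List Char) (j : Int) : Int :=
  if h : j ≤ (t.length : Int) then
    if List.isPrefixOf f (PySem.List.slice t (some j) none) then j
    else findFromW t f (j + 1)
  else -1
termination_by ((t.length : Int) + 1 - j).toNat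
decreasing_by omega

theorem findFromW_ge (t f : List Char) (j : Int) (h : findFromW t f j ≠ -1) :
    j ≤ findFromW t f j := by
  fun_induction findFromW t f j
  all_goals simp_all
  all_goals omega

def advCursorW (t : List Char) (stop : Int) (c : Int) (q : Bool) : Int × Bool :=
  if h : c < stop then
    match PySem.List.pyGet? t c with
    | none => advCursorW t stop (c + 1) q
    | some ch =>
      if ch = '\\' then advCursorW t stop (c + 2) q
      else if ch = '"' then advCursorW t stop (c + 1) (!q)
      else advCursorW t stop (c + 1) q
  else (c, q)
termination_by (stop - c).toNat
decreasing_by all_goals omega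

def altW (t f : List Char) (start c : Int) (q : Bool) : Int :=
  if h1 : findFromW t f start = -1 then -1
  else if h2 : (t.length : Int) ≤ findFromW t f start then -1
  else
    let pos := findFromW t f start
    let s1 := advCursorW t pos c q
    match PySem.List.pyGet? t pos with
    | none => -1
    | some ch =>
      if s1.1 = pos ∧ s1.2 = false ∧ ch ≠ '\\' ∧ ch ≠ '"' then pos
      else
        let s2 := advCursorW t (pos + 1) s1.1 s1.2
        altW t f (pos + 1) s2.1 s2.2
termination_by ((t.length : Int) + 1 - start).toNat
decreasing_by
  have := findFromW_ge t f start h1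
  omega


theorem loopA_none (t f : List Char) (c : Int) (q : Bool) (h0 : 0 ≤ c)
    (hno : ∀ k : Int, c ≤ k → k < (t.length : Int) → ¬ f <+: t.drop k.toNat) :
    loopAW t f c q = -1 := by
  fun_induction loopAW t f c q with
  | case1 i q hi hg => rfl
  | case2 i q hi hg ih => exact ih (by omega) (fun k a b => hno k (by omega) b)
  | case3 i q hi hg hne ih => exact ih (by omega) (fun k a b => hno k (by omega) b)
  | case4 i q hi ch hg hbs hq hsw => 
      exfalso
      have := hno i le_rfl hi
      rw [PySem.List.slice_from t h0] at hsw
      simp only [Bool.and_eq_true] at hsw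
      exact this ((PySem.Chars.startswith_iff _ _).mp hsw.1)
  | case5 i q hi ch hg hbs hq hsw ih => exact ih (by omega) (fun k a b => hno k (by omega) b)
  | case6 i q hi => rfl

theorem advCursorW_fst_ge (t : List Char) (stop c : Int) (q : Bool) :
    stop ≤ (advCursorW t stop c q).1 := by
  fun_induction advCursorW t stop c q
  all_goals simp_all

theorem advCursorW_base (t : List Char) (stop c : Int) (q : Bool) (h : stop ≤ c) :
    advCursorW t stop c q = (c, q) := by
  rw [advCursorW]
  simp [show ¬ c < stop by omega]

theorem loopA_skip (t f : List Char) (stop c : Int) (q : Bool) (h0 : 0 ≤ c)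
    (hstop : stop ≤ (t.length : Int))
    (hno : ∀ k : Int, c ≤ k → k < stop → ¬ f <+: t.drop k.toNat) :
    loopAW t f c q
      = loopAW t f (advCursorW t stop c q).1 (advCursorW t stop c q).2 := by
  fun_induction advCursorW t stop c q with
  | case1 c q hc hg _ =>
      exfalso
      rw [PySem.List.pyGet?_of_nonneg t h0] at hg
      rw [List.getElem?_eq_none_iff] at hg
      omega
  | case2 c q hc hg ih =>
      have hlt : c < (t.length : Int) := by omega
      rw [loopAW]
      simp only [hlt, dif_pos, hg]
      exact ih (by omega) (fun k a b => hno k (by omega) b)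
  | case3 c q hc hg hne ih =>
      have hlt : c < (t.length : Int) := by omega
      rw [loopAW]
      simp only [hlt, dif_pos, hg, if_neg hne]
      exact ih (by omega) (fun k a b => hno k (by omega) b)
  | case4 c q hc ch hg hbs hq ih =>
      have hlt : c < (t.length : Int) := by omega
      have hsw : PySem.Chars.startswith (PySem.List.slice t (some c) none) f = false := by
        rw [PySem.List.slice_from t h0]
        rw [Bool.eq_false_iff]
        intro hcon
        exact hno c le_rfl hc ((PySem.Chars.startswith_iff _ _).mp hcon)
      rw [loopAW]
      simp only [hlt, dif_pos, hg, if_neg hbs, if_neg hq, hsw, Bool.false_and,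
        Bool.false_eq_true, if_false]
      exact ih (by omega) (fun k a b => hno k (by omega) b)
  | case5 c q hc => rfl

theorem findFromW_none (t f : List Char) (j : Int) (h0 : 0 ≤ j)
    (h : findFromW t f j = -1) :
    ∀ k : Int, j ≤ k → k ≤ (t.length : Int) → ¬ f <+: t.drop k.toNat := by
  fun_induction findFromW t f j with
  | case1 j hj hpre => omega
  | case2 j hj hpre ih =>
      intro k hk1 hk2 hp
      rcases eq_or_lt_of_le hk1 with rfl | hlt
      · exact hpre (by rw [PySem.List.slice_from t h0]; exact List.isPrefixOf_iff_prefix.mpr hp)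
      · exact ih (by omega) h k (by omega) hk2 hp
  | case3 j hj => intro k hk1 hk2 _; omega

theorem findFromW_spec (t f : List Char) (j : Int) (h0 : 0 ≤ j)
    (h : findFromW t f j ≠ -1) :
    findFromW t f j ≤ (t.length : Int) ∧ f <+: t.drop (findFromW t f j).toNat ∧
      ∀ k : Int, j ≤ k → k < findFromW t f j → ¬ f <+: t.drop k.toNat := by
  fun_induction findFromW t f j with
  | case1 j hj hpre =>
      refine ⟨hj, ?_, by omega⟩
      rw [PySem.List.slice_from t h0] at hpre
      exact List.isPrefixOf_iff_prefix.mp hpre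
  | case2 j hj hpre ih =>
      obtain ⟨a, b, cmin⟩ := ih (by omega) h
      refine ⟨a, b, ?_⟩
      intro k hk1 hk2 hp
      rcases eq_or_lt_of_le hk1 with rfl | hlt
      · exact hpre (by rw [PySem.List.slice_from t h0]; exact List.isPrefixOf_iff_prefix.mpr hp)
      · exact cmin k (by omega) hk2 hp
  | case3 j hj => simp at h

theorem consume_step (t f : List Char) (p : Int) (q : Bool) (hlt : p < (t.length : Int))
    (ch : Char) (hg : PySem.List.pyGet? t p = some ch)
    (hfail : ch = '\\' ∨ ch = '"' ∨ q = true) :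
    loopAW t f p q
      = loopAW t f (advCursorW t (p + 1) p q).1 (advCursorW t (p + 1) p q).2 := by
  rw [advCursorW]
  simp only [show p < p + 1 by omega, dif_pos, hg]
  by_cases hbs : ch = '\\'
  · subst hbs
    rw [advCursorW_base t (p + 1) (p + 2) q (by omega)]
    rw [loopAW]
    simp [hlt, hg]
  · by_cases hq : ch = '"'
    · subst hq
      simp only [if_neg hbs]
      rw [advCursorW_base t (p + 1) (p + 1) (!q) (by omega)]
      rw [loopAW]
      simp [hlt, hg, hbs]
    · have hqt : q = true := by tauto
      subst hqt
      simp only [if_neg hbs, if_neg hq]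
      rw [advCursorW_base t (p + 1) (p + 1) true (by omega)]
      rw [loopAW]
      simp [hlt, hg, hbs, hq]

theorem main_lemma (t f : List Char) (start c : Int) (q : Bool)
    (h0 : 0 ≤ start) (hsc : start ≤ c) :
    altW t f start c q = loopAW t f c q := by
  fun_induction altW t f start c q with
  | case1 start c q h1 =>
      exact (loopA_none t f c q (by omega)
        (fun k hk1 hk2 => findFromW_none t f start h0 h1 k (by omega) (by omega))).symm
  | case2 start c q h1 h2 =>
      have hge := findFromW_ge t f start h1
      obtain ⟨hle, hpre, hmin⟩ := findFromW_spec t f start h0 h1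
      have hF : findFromW t f start = (t.length : Int) := by omega
      have hf : f = [] := by
        rw [hF] at hpre
        simpa using hpre
      have hstart : (t.length : Int) ≤ start := by
        by_contra hcon
        exact hmin start le_rfl (by omega) (by rw [hf]; exact List.nil_prefix)
      symm
      rw [loopAW]
      simp [show ¬ c < (t.length : Int) by omega]
  | case3 start c q h1 h2 pos hg =>
      simp only [pos] at hg
      have hge := findFromW_ge t f start h1
      rw [PySem.List.pyGet?_of_nonneg t (by omega)] at hg
      rw [List.getElem?_eq_none_iff] at hg
      exfalso; omega
  | case4 start c q h1 h2 pos s1 ch hg hcond =>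
      simp only [pos, s1] at hg hcond ⊢
      obtain ⟨hc1, hc2, hc3, hc4⟩ := hcond
      have hge := findFromW_ge t f start h1
      obtain ⟨hle, hpre, hmin⟩ := findFromW_spec t f start h0 h1
      have hcle : c ≤ findFromW t f start := by
        by_contra hcon
        rw [advCursorW_base t _ c q (by omega)] at hc1
        simp at hc1; omega
      have hskip := loopA_skip t f (findFromW t f start) c q (by omega) (by omega)
        (fun k hk1 hk2 => hmin k (by omega) hk2)
      symm
      rw [hskip, hc1, hc2]
      rw [loopAW]
      simp only [show findFromW t f start < (t.length : Int) by omega, dif_pos, hg,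
        if_neg hc3, if_neg hc4]
      rw [PySem.List.slice_from t (by omega)]
      simp [(PySem.Chars.startswith_iff _ _).mpr hpre]
  | case5 start c q h1 h2 pos s1 ch hg hcond s2 ih =>
      simp only [pos, s1] at hg hcond
      simp only [pos, s1, s2] at ih ⊢
      have hge := findFromW_ge t f start h1
      obtain ⟨hle, hpre, hmin⟩ := findFromW_spec t f start h0 h1
      by_cases hcgt : findFromW t f start < c
      · have e1 : advCursorW t (findFromW t f start) c q = (c, q) :=
          advCursorW_base _ _ _ _ (by omega)
        simp only [e1] at ih ⊢
        have e2 : advCursorW t (findFromW t f start + 1) c q = (c, q) :=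
          advCursorW_base _ _ _ _ (by omega)
        simp only [e2] at ih ⊢
        exact ih (by omega) (by omega)
      · have hcle : c ≤ findFromW t f start := by omega
        have hskip := loopA_skip t f (findFromW t f start) c q (by omega) (by omega)
          (fun k hk1 hk2 => hmin k (by omega) hk2)
        have hs1ge := advCursorW_fst_ge t (findFromW t f start) c q
        by_cases hs1 : (advCursorW t (findFromW t f start) c q).1 = findFromW t f start
        · -- the cursor lands exactly on pos, which fails eligibility
          have hdis : ch = '\\' ∨ ch = '"' ∨ (advCursorW t (findFromW t f start) c q).2 = true := by
            by_cases b1 : ch = '\\'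
            · exact Or.inl b1
            by_cases b2 : ch = '"'
            · exact Or.inr (Or.inl b2)
            by_cases b3 : (advCursorW t (findFromW t f start) c q).2 = false
            · exact absurd ⟨hs1, b3, b1, b2⟩ hcond
            · exact Or.inr (Or.inr (by simpa using b3))
          have hstep := consume_step t f (findFromW t f start)
            (advCursorW t (findFromW t f start) c q).2 (by omega) ch hg hdis
          rw [hs1] at ih ⊢
          rw [hskip, hs1, hstep]
          exact ih (by omega) (by
            have := advCursorW_fst_ge t (findFromW t f start + 1)
              (findFromW t f start) (advCursorW t (findFromW t f start) c q).2
            omega)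
        · -- the cursor jumped over pos
          have e2 : advCursorW t (findFromW t f start + 1)
              (advCursorW t (findFromW t f start) c q).1
              (advCursorW t (findFromW t f start) c q).2
              = ((advCursorW t (findFromW t f start) c q).1,
                 (advCursorW t (findFromW t f start) c q).2) :=
            advCursorW_base _ _ _ _ (by omega)
          rw [hskip]
          simp only [e2] at ih ⊢
          exact ih (by omega) (by omega)

-- ===== fuel adequacy =====
theorem loopA_fuel_eq (t f : List Char) (fuel : Nat) (i : Int) (q : Bool)
    (hf : ((t.length : Int) - i).toNat ≤ fuel) :
    findNotInQuotesLoop t f fuel i q = loopAW t f i q := by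
  induction fuel generalizing i q with
  | zero =>
      rw [loopAW]
      simp [findNotInQuotesLoop, show ¬ i < (t.length : Int) by omega]
  | succ n ih =>
      rw [loopAW]
      by_cases h : i < (t.length : Int)
      · simp only [findNotInQuotesLoop, if_pos h, dif_pos h]
        cases hg : PySem.List.pyGet? t i with
        | none => rfl
        | some ch =>
          by_cases hbs : ch = '\\'
          · subst hbs; simp only [if_pos rfl]; exact ih (i + 2) q (by omega)
          · by_cases hq : ch = '"'
            · subst hq; simp only [if_neg hbs, if_pos rfl]; exact ih (i + 1) (!q) (by omega)
            · simp only [if_neg hbs, if_neg hq]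
              by_cases hsw : (PySem.Chars.startswith (PySem.List.slice t (some i) none) f && !q) = true
              · simp [hsw]
              · simp only [if_neg hsw]; exact ih (i + 1) q (by omega)
      · simp [findNotInQuotesLoop, h]

theorem findFromB_fuel_eq (t f : List Char) (fuel : Nat) (j : Int)
    (hf : ((t.length : Int) + 1 - j).toNat ≤ fuel) :
    findFromB t f fuel j = findFromW t f j := by
  induction fuel generalizing j with
  | zero =>
      rw [findFromW]
      simp [findFromB, show ¬ j ≤ (t.length : Int) by omega]
  | succ n ih =>
      rw [findFromW]
      by_cases h : j ≤ (t.length : Int)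
      · simp only [findFromB, if_pos h, dif_pos h]
        by_cases hp : List.isPrefixOf f (PySem.List.slice t (some j) none)
        · simp [hp]
        · simp only [if_neg hp]; exact ih (j + 1) (by omega)
      · simp [findFromB, h]

theorem advCursor_fuel_eq (t : List Char) (fuel : Nat) (stop c : Int) (q : Bool)
    (hf : (stop - c).toNat ≤ fuel) :
    advCursor t fuel stop c q = advCursorW t stop c q := by
  induction fuel generalizing c q with
  | zero =>
      rw [advCursorW]
      simp [advCursor, show ¬ c < stop by omega]
  | succ n ih =>
      rw [advCursorW]
      by_cases h : c < stop
      · simp only [advCursor, if_pos h, dif_pos h]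
        cases hg : PySem.List.pyGet? t c with
        | none => exact ih (c + 1) q (by omega)
        | some ch =>
          by_cases hbs : ch = '\\'
          · subst hbs; simp only [if_pos rfl]; exact ih (c + 2) q (by omega)
          · by_cases hq : ch = '"'
            · subst hq; simp only [if_neg hbs, if_pos rfl]; exact ih (c + 1) (!q) (by omega)
            · simp only [if_neg hbs, if_neg hq]; exact ih (c + 1) q (by omega)
      · simp [advCursor, h]

theorem pyFind_eq (t f : List Char) (start : Int) (h0 : 0 ≤ start) :
    pyFind t f start = findFromW t f start := by
  unfold pyFind
  simp only [show ¬ start < 0 by omega, if_false]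
  exact findFromB_fuel_eq t f _ start le_rfl

theorem alt_fuel_eq (t f : List Char) (fuel : Nat) (start c : Int) (q : Bool) (h0 : 0 ≤ start)
    (hf : ((t.length : Int) + 1 - start).toNat ≤ fuel) :
    findNotInQuotesAltLoop t f fuel start c q = altW t f start c q := by
  induction fuel generalizing start c q with
  | zero =>
      have hs : (t.length : Int) < start := by omega
      have hfw : findFromW t f start = -1 := by
        rw [findFromW]; simp [show ¬ start ≤ (t.length : Int) by omega]
      rw [altW]
      simp [findNotInQuotesAltLoop, hfw]
  | succ n ih =>
      rw [altW]
      have hpos : pyFind t f start = findFromW t f start := pyFind_eq t f start h0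
      simp only [findNotInQuotesAltLoop, hpos]
      by_cases h1 : findFromW t f start = -1
      · simp [h1]
      · have hge := findFromW_ge t f start h1
        simp only [dif_neg h1, if_neg h1]
        by_cases h2 : (t.length : Int) ≤ findFromW t f start
        · simp [h2]
        · simp only [dif_neg h2, if_neg h2]
          have hadv1 : advCursor t (findFromW t f start - c).toNat (findFromW t f start) c q
              = advCursorW t (findFromW t f start) c q :=
            advCursor_fuel_eq t _ _ c q le_rfl
          simp only [hadv1]
          cases hg : PySem.List.pyGet? t (findFromW t f start) with
          | none => rfl
          | some ch =>
            by_cases hcond : (advCursorW t (findFromW t f start) c q).1 = findFromW t f start ∧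
                (advCursorW t (findFromW t f start) c q).2 = false ∧ ch ≠ '\\' ∧ ch ≠ '"'
            · simp [hcond]
            · simp only [if_neg hcond]
              have hadv2 : advCursor t
                  (findFromW t f start + 1 - (advCursorW t (findFromW t f start) c q).1).toNat
                  (findFromW t f start + 1)
                  (advCursorW t (findFromW t f start) c q).1
                  (advCursorW t (findFromW t f start) c q).2
                  = advCursorW t (findFromW t f start + 1)
                      (advCursorW t (findFromW t f start) c q).1
                      (advCursorW t (findFromW t f start) c q).2 :=
                advCursor_fuel_eq t _ _ _ _ le_rfl
              simp only [hadv2]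
              exact ih (findFromW t f start + 1) _ _ (by omega) (by omega)

-- ===== VERDICT (by name: the statement is the Claim_ definition above) =====
theorem findNotInQuotes_spec : Claim_equal_findNotInQuotes := by
  intro text find i _ hpre
  unfold Spec_findNotInQuotes findNotInQuotes findNotInQuotes_alt
  rw [loopA_fuel_eq text.toList find.toList _ i false le_rfl]
  rw [alt_fuel_eq text.toList find.toList _ i i false hpre le_rfl]
  exact (main_lemma text.toList find.toList i i false hpre le_rfl).symm
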